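-- pv_equiv track=rewrite | github.com/liuxiaotong/data-recipe | src/datarecipe/extractors/rubrics_analyzer.py | _extract_common_phrases
-- ===== SOURCE A (Python) =====
-- from collections import Counter
--
-- def _extract_common_phrases(
--     rubrics: list[str], min_freq: int = 5, max_phrases: int = 20
-- ) -> list[tuple[str, int]]:
--     """Extract commonly occurring phrases."""
--     phrase_counter = Counter()
--
--     # Extract 3-5 word phrases
--     for rubric in rubrics:
--         words = rubric.lower().split()
--         for n in range(3, 6):
--             for i in range(len(words) - n + 1):
--                 phrase = " ".join(words[i : i + n])
--                 if phrase.startswith(("the response", "should")):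
--                     phrase_counter[phrase] += 1
--
--     # Filter and return top phrases
--     common = [(phrase, count) for phrase, count in phrase_counter.items() if count >= min_freq]
--     common.sort(key=lambda x: -x[1])
--     return common[:max_phrases]
-- ===== SOURCE B (Python) =====
-- from collections import Counter
--
--
-- def _extract_common_phrases(
--     rubrics: list[str], min_freq: int = 5, max_phrases: int = 20
-- ) -> list[tuple[str, int]]:
--     """Extract commonly occurring phrases (candidate-prescan, bucketed by length)."""
--     counter = Counter()
--
--     for rubric in rubrics:
--         words = rubric.lower().split()
--         limit = len(words)
--         # One pass over the words: at each candidate start, grow the phrase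
--         # incrementally and drop it into the bucket for its length.
--         tri, quad, penta = [], [], []
--         for i, w in enumerate(words):
--             if not (w == "the" or w.startswith("should")):
--                 continue
--             if i + 3 > limit:
--                 continue
--             p = " ".join((w, words[i + 1], words[i + 2]))
--             tri.append(p)
--             if i + 4 <= limit:
--                 p = " ".join((p, words[i + 3]))
--                 quad.append(p)
--                 if i + 5 <= limit:
--                     p = " ".join((p, words[i + 4]))
--                     penta.append(p)
--         for bucket in (tri, quad, penta):
--             for p in bucket:
--                 if p.startswith(("the response", "should")):
--                     counter[p] += 1
--
--     common = [(phrase, count) for phrase, count in counter.items() if count >= min_freq]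
--     common.sort(key=lambda x: -x[1])
--     return common[:max_phrases]
-- ===== Notes on version B (the rewrite author's own statement) =====
-- stated objective: alternative
-- what changed: Instead of re-scanning all n-gram start positions for each phrase length, B makes one pass over the words of each rubric, detects candidate starts (word == 'the' or startswith('should')), grows each candidate's 3/4/5-word phrase incrementally into three length buckets, and then counts the bucketed phrases; the min_freq filter, stable sort by descending count and max_phrases slice are unchanged.
import Mathlib
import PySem

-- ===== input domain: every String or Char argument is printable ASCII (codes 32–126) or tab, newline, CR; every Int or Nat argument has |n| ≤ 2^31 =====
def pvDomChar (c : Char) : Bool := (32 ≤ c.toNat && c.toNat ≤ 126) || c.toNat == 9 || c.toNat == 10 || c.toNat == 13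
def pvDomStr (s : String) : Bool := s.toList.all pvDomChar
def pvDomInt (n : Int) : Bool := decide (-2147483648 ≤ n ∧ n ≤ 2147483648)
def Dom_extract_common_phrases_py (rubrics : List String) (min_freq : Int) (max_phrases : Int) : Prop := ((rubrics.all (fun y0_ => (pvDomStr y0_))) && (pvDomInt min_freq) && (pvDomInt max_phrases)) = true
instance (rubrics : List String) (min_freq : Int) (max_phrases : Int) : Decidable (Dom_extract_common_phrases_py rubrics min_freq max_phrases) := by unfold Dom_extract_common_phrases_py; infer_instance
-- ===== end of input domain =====

-- B re-implements A by a per-rubric candidate prescan: one pass over enumerate(words) grows each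
-- candidate phrase incrementally into three length buckets, which are then counted; same output. (objective: alternative)

-- ===== PORT A =====
-- shared helper: the literal tuple-startswith test from both Pythons
def pvTest (p : String) : Bool :=
  PySem.Str.startswith p "the response" || PySem.Str.startswith p "should"

def extract_common_phrases_py (rubrics : List String) (min_freq : Int) (max_phrases : Int) : List (String × Int) :=
  let phrase_counter : PySem.Dict String Int :=
    rubrics.foldl (fun d rubric =>
      let words := PySem.Str.split₀ (PySem.Str.lower rubric)
      (PySem.List.pyRange 3 6 1).foldl (fun d n =>
        (PySem.List.pyRange 0 ((words.length : Int) - n + 1) 1).foldl (fun d i =>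
          let phrase := PySem.Str.join " " (PySem.List.slice words (some i) (some (i + n)))
          if pvTest phrase then d.modify phrase 0 (· + 1) else d) d) d)
      PySem.Dict.empty
  let common := phrase_counter.items.filter (fun pc => min_freq ≤ pc.2)
  let common := PySem.List.sorted common (fun x => -x.2) false
  PySem.List.slice common none (some max_phrases)

-- ===== PORT B =====
-- candidate test on the first word: w == "the" or w.startswith("should")
def pvCand (w : String) : Bool := w == "the" || PySem.Str.startswith w "should"

def extract_common_phrases_py_alt (rubrics : List String) (min_freq : Int) (max_phrases : Int) : List (String × Int) :=
  let counter : PySem.Dict String Int :=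
    rubrics.foldl (fun d rubric =>
      let words := PySem.Str.split₀ (PySem.Str.lower rubric)
      let limit : Int := words.length
      -- one pass over enumerate(words): grow each candidate phrase incrementally into three buckets
      -- (python's  p = " ".join((p, words[i+3]))  is exactly PySem.Str.join; indexing is guarded in range)
      let bks : List String × List String × List String :=
        (PySem.List.enumerate words).foldl (fun bks iw =>
          if !(pvCand iw.2) then bks
          else if limit < iw.1 + 3 then bks
          else
            let p := PySem.Str.join " " [iw.2, PySem.List.pyGetD words (iw.1 + 1) "", PySem.List.pyGetD words (iw.1 + 2) ""]
            let tri := bks.1 ++ [p]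
            if iw.1 + 4 ≤ limit then
              let p := PySem.Str.join " " [p, PySem.List.pyGetD words (iw.1 + 3) ""]
              let quad := bks.2.1 ++ [p]
              if iw.1 + 5 ≤ limit then
                (tri, quad, bks.2.2 ++ [PySem.Str.join " " [p, PySem.List.pyGetD words (iw.1 + 4) ""]])
              else (tri, quad, bks.2.2)
            else (tri, bks.2.1, bks.2.2))
          ([], [], [])
      [bks.1, bks.2.1, bks.2.2].foldl (fun d bucket =>
        bucket.foldl (fun d p => if pvTest p then d.modify p 0 (· + 1) else d) d) d)
      PySem.Dict.empty
  let common := counter.items.filter (fun pc => min_freq ≤ pc.2)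
  let common := PySem.List.sorted common (fun x => -x.2) false
  PySem.List.slice common none (some max_phrases)

-- ===== PRECONDITION & SPEC =====
def Spec_extract_common_phrases_py (rubrics : List String) (min_freq : Int) (max_phrases : Int) (out : List (String × Int)) : Prop := out = extract_common_phrases_py_alt rubrics min_freq max_phrases
instance (rubrics : List String) (min_freq : Int) (max_phrases : Int) (out : List (String × Int)) : Decidable (Spec_extract_common_phrases_py rubrics min_freq max_phrases out) := by unfold Spec_extract_common_phrases_py; infer_instance

-- ===== CLAIM (what is proved, stated in full; the proofs are below) =====
def Claim_equal_extract_common_phrases_py : Prop := ∀ (rubrics : List String) (min_freq : Int) (max_phrases : Int), Dom_extract_common_phrases_py rubrics min_freq max_phrases → Spec_extract_common_phrases_py rubrics min_freq max_phrases (extract_common_phrases_py rubrics min_freq max_phrases)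

-- ===== LEMMAS AND PROOFS =====

theorem pv_go_nospace (s cur : List Char) (acc : List (List Char))
    (hcur : ∀ c ∈ cur, PySem.Chars.isspace c = false)
    (hacc : ∀ w ∈ acc, ∀ c ∈ w, PySem.Chars.isspace c = false) :
    ∀ w ∈ PySem.Chars.split₀.go s cur acc, ∀ c ∈ w, PySem.Chars.isspace c = false := by
  induction s generalizing cur acc with
  | nil =>
    intro w hw
    simp only [PySem.Chars.split₀.go] at hw
    split at hw
    · simp only [List.mem_reverse] at hw; exact hacc w hw
    · simp only [List.mem_reverse, List.mem_cons] at hw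
      rcases hw with h | h
      · subst h; intro c hc; exact hcur c (List.mem_reverse.mp hc)
      · exact hacc w h
  | cons c rest ih =>
    intro w hw
    simp only [PySem.Chars.split₀.go] at hw
    by_cases hs : PySem.Chars.isspace c = true
    · rw [if_pos hs] at hw
      split at hw
      · exact ih [] acc (by simp) hacc w hw
      · refine ih [] (cur.reverse :: acc) (by simp) ?_ w hw
        intro v hv
        rcases List.mem_cons.mp hv with h | h
        · subst h; intro d hd; exact hcur d (List.mem_reverse.mp hd)
        · exact hacc v h
    · rw [if_neg hs] at hw
      refine ih (c :: cur) acc ?_ hacc w hw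
      intro d hd
      rcases List.mem_cons.mp hd with h | h
      · subst h; exact Bool.not_eq_true _ ▸ (by simpa using hs)
      · exact hcur d h

theorem pv_split_nospace (r : String) :
    ∀ w ∈ PySem.Str.split₀ r, ∀ c ∈ w.toList, PySem.Chars.isspace c = false := by
  intro w hw
  have : w.toList ∈ PySem.Chars.split₀ r.toList := by
    rw [← PySem.Str.split₀_map_toList]
    exact List.mem_map_of_mem hw
  exact pv_go_nospace r.toList [] [] (by simp) (by simp) w.toList this

-- p has no space, p is a prefix of (w ++ ' ' :: r) ⇒ p is a prefix of w
theorem pv_prefix_space_free {p w r : List Char} (hp : ' ' ∉ p)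
    (h : p <+: w ++ ' ' :: r) : p <+: w := by
  rcases List.prefix_or_prefix_of_prefix h (List.prefix_append w (' ' :: r)) with h1 | h1
  · exact h1
  · rcases h1 with ⟨q, hq⟩
    subst hq
    have hq' : q <+: ' ' :: r := (List.prefix_append_right_inj w).mp h
    match q, hq' with
    | [], _ => simpa using List.prefix_refl w
    | c :: q', hq' =>
      have : c = ' ' := by
        rcases hq' with ⟨t, ht⟩
        exact (List.cons_eq_cons.mp ht).1
      exact absurd (show (' ' ∈ w ++ c :: q') by simp [this]) hp

-- "the response" prefix of (w ++ ' ' :: r) with w space-free ⇒ w = "the"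
theorem pv_prefix_the {w r : List Char}
    (hw : ∀ c ∈ w, PySem.Chars.isspace c = false)
    (h : "the response".toList <+: w ++ ' ' :: r) : w = "the".toList := by
  have hsp : PySem.Chars.isspace ' ' = true := by decide
  rcases List.prefix_or_prefix_of_prefix h (List.prefix_append w (' ' :: r)) with h1 | h1
  · exfalso
    have : ' ' ∈ w := h1.mem (by decide)
    have := hw _ this
    simp [hsp] at this
  · rcases h1 with ⟨q, hq⟩
    have hq' : q <+: ' ' :: r := by
      rw [← hq] at h
      exact (List.prefix_append_right_inj w).mp h
    match q, hq' with
    | [], _ =>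
      exfalso
      have hmem : ' ' ∈ w ++ [] := by rw [hq]; decide
      have := hw _ (by simpa using hmem)
      simp [hsp] at this
    | c :: q', hq'2 =>
      have hc : c = ' ' := by
        rcases hq'2 with ⟨t, ht⟩
        exact (List.cons_eq_cons.mp ht).1
      subst hc
      have hq2 : w ++ ' ' :: q' = "the response".toList := by
        simpa using hq
      have hget : ("the response".toList)[w.length]? = some ' ' := by
        rw [← hq2, List.getElem?_append_right (le_refl _)]
        simp
      have h12 : w.length < 12 := by
        have : w.length < ("the response".toList).length := by rw [← hq2]; simp
        simpa using this
      have hk3 : w.length = 3 := by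
        interval_cases h : w.length <;> revert hget <;> decide
      have hw3 : w = ("the response".toList).take w.length := by
        rw [← hq2, List.take_left]
      rw [hk3] at hw3
      rw [hw3]; decide

def pvCnt (d : PySem.Dict String Int) (p : String) : PySem.Dict String Int :=
  if pvTest p then d.modify p 0 (· + 1) else d

def pvG (W : List String) (n i : Int) : String :=
  PySem.Str.join " " (PySem.List.slice W (some i) (some (i + n)))

def pvW (W : List String) (i : Int) : String := PySem.List.pyGetD W i ""

-- the phrase test forces the first word to be a candidate
theorem pv_test_cand (W : List String)
    (hW : ∀ w ∈ W, ∀ c ∈ w.toList, PySem.Chars.isspace c = false)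
    {n i : Int} (hi : 0 ≤ i) (hn : 3 ≤ n) (hb : i + n ≤ (W.length : Int))
    (ht : pvTest (pvG W n i) = true) : pvCand (pvW W i) = true := by
  have hlt : i.toNat < W.length := by omega
  have hlt1 : i.toNat + 1 < W.length := by omega
  have hsl : PySem.List.slice W (some i) (some (i + n)) =
      W[i.toNat] :: W[i.toNat + 1] :: ((W.drop (i.toNat + 2)).take (n.toNat - 2)) := by
    rw [PySem.List.slice_toNat W hi (by omega)]
    rw [List.drop_eq_getElem_cons hlt, List.drop_eq_getElem_cons hlt1]
    have h2 : (i + n).toNat - i.toNat = (n.toNat - 2) + 1 + 1 := by omega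
    rw [h2, List.take_succ_cons, List.take_succ_cons]
  have hw0 : pvW W i = W[i.toNat] := PySem.List.pyGetD_eq_getElem W "" hi (by omega)
  have hjoin : (pvG W n i).toList =
      W[i.toNat].toList ++ ' ' ::
        (PySem.Chars.join [' '] (List.map String.toList
          (W[i.toNat + 1] :: ((W.drop (i.toNat + 2)).take (n.toNat - 2))))) := by
    rw [pvG, PySem.Str.toList_join, hsl]
    simp only [List.map_cons]
    rw [show (" " : String).toList = [' '] from rfl]
    rw [PySem.Chars.join_cons_cons]
    simp [List.append_assoc]
  have hnospace : ∀ c ∈ W[i.toNat].toList, PySem.Chars.isspace c = false :=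
    hW _ (List.getElem_mem hlt)
  rw [pvTest] at ht
  rcases Bool.or_eq_true_iff.mp ht with h | h
  · -- "the response"
    have hpre : "the response".toList <+: (pvG W n i).toList := by
      have := PySem.Chars.startswith_iff (pvG W n i).toList ("the response".toList)
      simp only [PySem.Str.startswith] at h
      exact (this.mp h)
    rw [hjoin] at hpre
    have := pv_prefix_the hnospace hpre
    have hws : W[i.toNat] = "the" := String.toList_inj.mp (by rw [this])
    rw [pvCand, hw0, hws]
    simp
  · -- "should"
    have hpre : "should".toList <+: (pvG W n i).toList := by
      simp only [PySem.Str.startswith] at h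
      exact (PySem.Chars.startswith_iff _ _).mp h
    rw [hjoin] at hpre
    have := pv_prefix_space_free (by decide) hpre
    rw [pvCand, hw0]
    refine Bool.or_eq_true_iff.mpr (Or.inr ?_)
    exact (PySem.Chars.startswith_iff _ _).mpr this

theorem pv_foldl_cnt (l : List Int) (f : Int → String) (d : PySem.Dict String Int) :
    l.foldl (fun d i => if pvTest (f i) then d.modify (f i) 0 (· + 1) else d) d
      = ((l.map f).filter pvTest).foldl (fun d p => d.modify p 0 (· + 1)) d := by
  rw [List.foldl_filter, List.foldl_map]

theorem pv_range_filter (L n : Int) (h0 : 0 ≤ L) (hn : 1 ≤ n) :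
    PySem.List.pyRange 0 (L - n + 1) 1
      = (PySem.List.pyRange 0 L 1).filter (fun i => decide (i + n ≤ L)) := by
  by_cases hc : L - n + 1 ≤ 0
  · rw [PySem.List.pyRange_one_eq_nil hc]
    symm
    rw [List.filter_eq_nil_iff]
    intro i hi
    have := PySem.List.mem_pyRange_one.mp hi
    intro hcon
    have := of_decide_eq_true hcon
    omega
  · rw [PySem.List.pyRange_one_append 0 (L - n + 1) L (by omega) (by omega),
      List.filter_append]
    have h1 : (PySem.List.pyRange 0 (L - n + 1) 1).filter (fun i => decide (i + n ≤ L))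
        = PySem.List.pyRange 0 (L - n + 1) 1 := by
      rw [List.filter_eq_self]
      intro i hi
      have := PySem.List.mem_pyRange_one.mp hi
      simp only [decide_eq_true_eq]
      omega
    have h2 : (PySem.List.pyRange (L - n + 1) L 1).filter (fun i => decide (i + n ≤ L))
        = [] := by
      rw [List.filter_eq_nil_iff]
      intro i hi
      have := PySem.List.mem_pyRange_one.mp hi
      intro hcon
      have := of_decide_eq_true hcon
      omega
    rw [h1, h2, List.append_nil]

theorem pv_bucket_filter_eq (W : List String)
    (hW : ∀ w ∈ W, ∀ c ∈ w.toList, PySem.Chars.isspace c = false)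
    (n : Int) (hn : 3 ≤ n) :
    (((PySem.List.pyRange 0 (W.length : Int) 1).filter
        (fun i => pvCand (pvW W i) && decide (i + n ≤ (W.length : Int)))).map (pvG W n)).filter pvTest
      = ((PySem.List.pyRange 0 ((W.length : Int) - n + 1) 1).map (pvG W n)).filter pvTest := by
  rw [pv_range_filter (W.length : Int) n (by positivity) (by omega)]
  rw [List.filter_map, List.filter_map, List.filter_filter, List.filter_filter]
  congr 1
  apply List.filter_congr
  intro i hi
  have hmem := PySem.List.mem_pyRange_one.mp hi
  simp only [Function.comp]
  cases hb : decide (i + n ≤ (W.length : Int)) with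
  | false => simp
  | true =>
    cases htst : pvTest (pvG W n i) with
    | false => simp
    | true =>
      have hcand := pv_test_cand W hW hmem.1 hn (of_decide_eq_true hb) htst
      simp [hcand]

theorem pv_join_append (sep : List Char) (ps : List (List Char)) (x : List Char) (h : ps ≠ []) :
    PySem.Chars.join sep (ps ++ [x]) = PySem.Chars.join sep ps ++ sep ++ x := by
  induction ps with
  | nil => exact absurd rfl h
  | cons p ps ih =>
    cases ps with
    | nil =>
      simp only [List.cons_append, List.nil_append]
      rw [PySem.Chars.join_cons_cons, PySem.Chars.join_singleton, PySem.Chars.join_singleton]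
    | cons q ps' =>
      simp only [List.cons_append]
      rw [PySem.Chars.join_cons_cons, PySem.Chars.join_cons_cons]
      have ih' := ih (by simp)
      simp only [List.cons_append] at ih'
      rw [ih']
      simp [List.append_assoc]

theorem pv_g3 (W : List String) {i : Int} (hi : 0 ≤ i) (hb : i + 3 ≤ (W.length : Int)) :
    PySem.Str.join " " [pvW W i, pvW W (i + 1), pvW W (i + 2)] = pvG W 3 i := by
  apply String.toList_inj.mp
  rw [pvG, PySem.Str.toList_join, PySem.Str.toList_join]
  have h0 : i.toNat < W.length := by omega
  have h1 : i.toNat + 1 < W.length := by omega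
  have h2 : i.toNat + 2 < W.length := by omega
  have hsl : PySem.List.slice W (some i) (some (i + 3)) =
      [W[i.toNat], W[i.toNat + 1], W[i.toNat + 2]] := by
    rw [PySem.List.slice_toNat W hi (by omega)]
    rw [List.drop_eq_getElem_cons h0, List.drop_eq_getElem_cons h1, List.drop_eq_getElem_cons h2]
    have h3 : (i + 3).toNat - i.toNat = 3 := by omega
    rw [h3]
    rfl
  rw [hsl]
  have e0 : pvW W i = W[i.toNat] := PySem.List.pyGetD_eq_getElem W "" hi (by omega)
  have e1 : pvW W (i + 1) = W[i.toNat + 1] := by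
    rw [pvW, PySem.List.pyGetD_eq_getElem W "" (by omega) (by omega)]
    congr 1
    omega
  have e2 : pvW W (i + 2) = W[i.toNat + 2] := by
    rw [pvW, PySem.List.pyGetD_eq_getElem W "" (by omega) (by omega)]
    congr 1
    omega
  rw [e0, e1, e2]

theorem pv_gsucc (W : List String) {i n : Int} (hi : 0 ≤ i) (hn : 1 ≤ n)
    (hb : i + n + 1 ≤ (W.length : Int)) :
    PySem.Str.join " " [pvG W n i, pvW W (i + n)] = pvG W (n + 1) i := by
  apply String.toList_inj.mp
  rw [PySem.Str.toList_join]
  have hk : (i + n).toNat < W.length := by omega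
  have hsl : PySem.List.slice W (some i) (some (i + (n + 1))) =
      PySem.List.slice W (some i) (some (i + n)) ++ [W[(i + n).toNat]] := by
    rw [PySem.List.slice_toNat W hi (by omega), PySem.List.slice_toNat W hi (by omega)]
    have h1 : (i + (n + 1)).toNat - i.toNat = ((i + n).toNat - i.toNat) + 1 := by omega
    rw [h1, List.take_add_one]
    congr 1
    have hidx : (i + n).toNat - i.toNat < (W.drop i.toNat).length := by
      simp [List.length_drop]
      omega
    rw [List.getElem?_eq_getElem hidx]
    simp only [List.getElem_drop]
    have : i.toNat + ((i + n).toNat - i.toNat) = (i + n).toNat := by omega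
    simp [this]
  have hne : PySem.List.slice W (some i) (some (i + n)) ≠ [] := by
    rw [PySem.List.slice_toNat W hi (by omega)]
    have : ((i + n).toNat - i.toNat) = n.toNat := by omega
    rw [this]
    apply List.ne_nil_of_length_pos
    simp [List.length_take, List.length_drop]
    omega
  rw [pvG, pvG, hsl, PySem.Str.toList_join]
  simp only [List.map_append, List.map_cons, List.map_nil]
  rw [pv_join_append _ _ _ (by simpa using hne)]
  rw [show (" " : String).toList = [' '] from rfl]
  rw [PySem.Chars.join_cons_cons, PySem.Chars.join_singleton]
  have ew : pvW W (i + n) = W[(i + n).toNat] :=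
    PySem.List.pyGetD_eq_getElem W "" (by omega) (by omega)
  rw [ew]
  rw [PySem.Str.toList_join]
  rfl

theorem pv_enum (xs : List String) (s : Int) :
    PySem.List.enumerate xs s
      = (PySem.List.pyRange s (s + xs.length) 1).map (fun i => (i, PySem.List.pyGetD xs (i - s) "")) := by
  induction xs generalizing s with
  | nil => simp [PySem.List.enumerate, PySem.List.pyRange_one_eq_nil]
  | cons x xs ih =>
    rw [PySem.List.enumerate_cons, PySem.List.pyRange_one_cons (by simp)]
    rw [List.map_cons]
    congr 1
    · simp [PySem.List.pyGetD_zero_cons]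
    · rw [ih (s + 1)]
      have : s + 1 + (xs.length : Int) = s + ((x :: xs).length : Int) := by
        simp
        omega
      rw [this]
      apply List.map_congr_left
      intro i hi
      have hm := PySem.List.mem_pyRange_one.mp hi
      have h1 : i - s = ((i - s).toNat : Int) := by omega
      have h2 : i - (s + 1) = (((i - s).toNat - 1 : Nat) : Int) := by omega
      rw [h1, h2, PySem.List.pyGetD_natCast, PySem.List.pyGetD_natCast]
      have h3 : ∃ k : Nat, (i - s).toNat = k + 1 := ⟨(i - s).toNat - 1, by omega⟩
      obtain ⟨k, hk⟩ := h3
      simp [hk]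

def pvBodyB (W : List String) (bks : List String × List String × List String)
    (iw : Int × String) : List String × List String × List String :=
  if !(pvCand iw.2) then bks
  else if (W.length : Int) < iw.1 + 3 then bks
  else
    let p := PySem.Str.join " " [iw.2, PySem.List.pyGetD W (iw.1 + 1) "", PySem.List.pyGetD W (iw.1 + 2) ""]
    let tri := bks.1 ++ [p]
    if iw.1 + 4 ≤ (W.length : Int) then
      let p := PySem.Str.join " " [p, PySem.List.pyGetD W (iw.1 + 3) ""]
      let quad := bks.2.1 ++ [p]
      if iw.1 + 5 ≤ (W.length : Int) then
        (tri, quad, bks.2.2 ++ [PySem.Str.join " " [p, PySem.List.pyGetD W (iw.1 + 4) ""]])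
      else (tri, quad, bks.2.2)
    else (tri, bks.2.1, bks.2.2)

def pvT (W : List String) (a n : Int) : List String :=
  ((PySem.List.pyRange a (W.length : Int) 1).filter
      (fun i => pvCand (pvW W i) && decide (i + n ≤ (W.length : Int)))).map (pvG W n)

theorem pv_fold_buckets (W : List String) : ∀ (k : Nat) (a : Int), 0 ≤ a →
    ((W.length : Int) - a).toNat = k → ∀ t q p,
    (PySem.List.pyRange a (W.length : Int) 1).foldl (fun bks i => pvBodyB W bks (i, pvW W i)) (t, q, p)
      = (t ++ pvT W a 3, q ++ pvT W a 4, p ++ pvT W a 5) := by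
  intro k
  induction k with
  | zero =>
    intro a ha hk t q p
    have hnil : PySem.List.pyRange a (W.length : Int) 1 = [] :=
      PySem.List.pyRange_one_eq_nil (by omega)
    simp [hnil, pvT]
  | succ k ih =>
    intro a ha hk t q p
    have haL : a < (W.length : Int) := by omega
    rw [PySem.List.pyRange_one_cons haL, List.foldl_cons]
    have hT : ∀ n : Int, pvT W a n =
        (if pvCand (pvW W a) && decide (a + n ≤ (W.length : Int))
          then pvG W n a :: pvT W (a + 1) n else pvT W (a + 1) n) := by
      intro n
      rw [pvT, PySem.List.pyRange_one_cons haL, List.filter_cons]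
      split
      · rw [List.map_cons]; rfl
      · rfl
    have iha := ih (a + 1) (by omega) (by omega)
    by_cases hc : pvCand (pvW W a) = true
    · by_cases h3 : a + 3 ≤ (W.length : Int)
      · have e3 : PySem.Str.join " " [pvW W a,
            PySem.List.pyGetD W (a + 1) "", PySem.List.pyGetD W (a + 2) ""] = pvG W 3 a :=
          pv_g3 W ha h3
        by_cases h4 : a + 4 ≤ (W.length : Int)
        · have e4 : PySem.Str.join " " [pvG W 3 a, PySem.List.pyGetD W (a + 3) ""] = pvG W 4 a := by
            have := pv_gsucc W (n := 3) ha (by omega) (by omega)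
            simpa using this
          by_cases h5 : a + 5 ≤ (W.length : Int)
          · have e5 : PySem.Str.join " " [pvG W 4 a, PySem.List.pyGetD W (a + 4) ""] = pvG W 5 a := by
              have := pv_gsucc W (n := 4) ha (by omega) (by omega)
              simpa using this
            have hbody : pvBodyB W (t, q, p) (a, pvW W a) =
                (t ++ [pvG W 3 a], q ++ [pvG W 4 a], p ++ [pvG W 5 a]) := by
              simp only [pvBodyB, hc, Bool.not_true, Bool.false_eq_true, if_false,
                if_neg (by omega : ¬ ((W.length : Int) < a + 3)), if_pos h4, if_pos h5]
              rw [e3, e4, e5]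
            rw [hbody, iha (t ++ [pvG W 3 a]) (q ++ [pvG W 4 a]) (p ++ [pvG W 5 a]),
              hT 3, hT 4, hT 5]
            simp [hc, h3, h4, h5]
          · have hbody : pvBodyB W (t, q, p) (a, pvW W a) =
                (t ++ [pvG W 3 a], q ++ [pvG W 4 a], p) := by
              simp only [pvBodyB, hc, Bool.not_true, Bool.false_eq_true, if_false,
                if_neg (by omega : ¬ ((W.length : Int) < a + 3)), if_pos h4,
                if_neg h5]
              rw [e3, e4]
            rw [hbody, iha (t ++ [pvG W 3 a]) (q ++ [pvG W 4 a]) p, hT 3, hT 4, hT 5]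
            simp [hc, h3, h4, h5]
        · have hbody : pvBodyB W (t, q, p) (a, pvW W a) = (t ++ [pvG W 3 a], q, p) := by
            simp only [pvBodyB, hc, Bool.not_true, Bool.false_eq_true, if_false,
              if_neg (by omega : ¬ ((W.length : Int) < a + 3)), if_neg h4]
            rw [e3]
          rw [hbody, iha (t ++ [pvG W 3 a]) q p, hT 3, hT 4, hT 5]
          simp [hc, h3, h4]
          omega
      · have hbody : pvBodyB W (t, q, p) (a, pvW W a) = (t, q, p) := by
          simp only [pvBodyB, hc, Bool.not_true, Bool.false_eq_true, if_false]
          rw [if_pos (by omega : (W.length : Int) < a + 3)]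
        rw [hbody, iha t q p, hT 3, hT 4, hT 5]
        simp [h3]
        exact ⟨fun _ => by omega, fun _ => by omega⟩
    · have hc' : pvCand (pvW W a) = false := by
        cases h : pvCand (pvW W a)
        · rfl
        · exact absurd h hc
      have hbody : pvBodyB W (t, q, p) (a, pvW W a) = (t, q, p) := by
        simp [pvBodyB, hc']
      rw [hbody, iha t q p, hT 3, hT 4, hT 5]
      simp [hc']

theorem pv_foldl_cnt2 (l : List String) (d : PySem.Dict String Int) :
    l.foldl (fun d p => if pvTest p then d.modify p 0 (· + 1) else d) d
      = (l.filter pvTest).foldl (fun d p => d.modify p 0 (· + 1)) d :=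
  (List.foldl_filter).symm

theorem pv_rubric (W : List String)
    (hW : ∀ w ∈ W, ∀ c ∈ w.toList, PySem.Chars.isspace c = false)
    (d : PySem.Dict String Int) :
    (PySem.List.pyRange 3 6 1).foldl (fun d n =>
        (PySem.List.pyRange 0 ((W.length : Int) - n + 1) 1).foldl
          (fun d i => if pvTest (pvG W n i) then d.modify (pvG W n i) 0 (· + 1) else d) d) d
      = (let bks := (PySem.List.enumerate W).foldl (pvBodyB W) ([], [], [])
         [bks.1, bks.2.1, bks.2.2].foldl (fun d bucket =>
           bucket.foldl (fun d p => if pvTest p then d.modify p 0 (· + 1) else d) d) d) := by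
  have hbks : (PySem.List.enumerate W).foldl (pvBodyB W) ([], [], [])
      = (pvT W 0 3, pvT W 0 4, pvT W 0 5) := by
    have h := pv_fold_buckets W ((W.length : Int) - 0).toNat 0 (le_refl 0) rfl [] [] []
    simp only [List.nil_append] at h
    rw [pv_enum W 0, List.foldl_map]
    simp only [sub_zero, zero_add]
    simpa using h
  rw [hbks]
  show _ = [pvT W 0 3, pvT W 0 4, pvT W 0 5].foldl _ d
  simp only [List.foldl_cons, List.foldl_nil]
  rw [show PySem.List.pyRange 3 6 1 = [3, 4, 5] by decide]
  simp only [List.foldl_cons, List.foldl_nil]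
  rw [pv_foldl_cnt, pv_foldl_cnt, pv_foldl_cnt]
  simp only [pvT]
  rw [← pv_bucket_filter_eq W hW 3 (by omega), ← pv_bucket_filter_eq W hW 4 (by omega),
    ← pv_bucket_filter_eq W hW 5 (by omega)]
  rw [pv_foldl_cnt2, pv_foldl_cnt2, pv_foldl_cnt2]

def pvStepA (d : PySem.Dict String Int) (rubric : String) : PySem.Dict String Int :=
  let words := PySem.Str.split₀ (PySem.Str.lower rubric)
  (PySem.List.pyRange 3 6 1).foldl (fun d n =>
    (PySem.List.pyRange 0 ((words.length : Int) - n + 1) 1).foldl (fun d i =>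
      let phrase := PySem.Str.join " " (PySem.List.slice words (some i) (some (i + n)))
      if pvTest phrase then d.modify phrase 0 (· + 1) else d) d) d

def pvStepB (d : PySem.Dict String Int) (rubric : String) : PySem.Dict String Int :=
  let words := PySem.Str.split₀ (PySem.Str.lower rubric)
  let bks := (PySem.List.enumerate words).foldl (pvBodyB words) ([], [], [])
  [bks.1, bks.2.1, bks.2.2].foldl (fun d bucket =>
    bucket.foldl (fun d p => if pvTest p then d.modify p 0 (· + 1) else d) d) d

theorem pv_step (d : PySem.Dict String Int) (r : String) : pvStepA d r = pvStepB d r :=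
  pv_rubric (PySem.Str.split₀ (PySem.Str.lower r)) (pv_split_nospace (PySem.Str.lower r)) d

def pvTail (min_freq max_phrases : Int) (c : PySem.Dict String Int) : List (String × Int) :=
  PySem.List.slice (PySem.List.sorted (c.items.filter (fun pc => min_freq ≤ pc.2)) (fun x => -x.2) false)
    none (some max_phrases)

set_option maxHeartbeats 1000000 in
theorem pv_final (rubrics : List String) (min_freq max_phrases : Int) :
    extract_common_phrases_py rubrics min_freq max_phrases
      = extract_common_phrases_py_alt rubrics min_freq max_phrases := by
  have hA : extract_common_phrases_py rubrics min_freq max_phrases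
      = pvTail min_freq max_phrases (rubrics.foldl pvStepA PySem.Dict.empty) := rfl
  have hB : extract_common_phrases_py_alt rubrics min_freq max_phrases
      = pvTail min_freq max_phrases (rubrics.foldl pvStepB PySem.Dict.empty) := rfl
  rw [hA, hB, show pvStepA = pvStepB from funext fun d => funext fun r => pv_step d r]

-- ===== VERDICT (by name: the statement is the Claim_ definition above) =====
theorem extract_common_phrases_py_spec : Claim_equal_extract_common_phrases_py := by
  intro rubrics min_freq max_phrases _
  exact pv_final rubrics min_freq max_phrases
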